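-- pv_equiv track=rewrite | github.com/shiningsunnyday/RandomWalk | diffusion.py | process_good_traj
-- ===== SOURCE A (Python) =====
-- def process_good_traj(traj, all_nodes):
--     """
--     take a numbered traj, like ['61', '90', '50[->12->37,->48]', '90']
--     turn it into ['L3','S32','S20[->P14->P39,->S18]','S32']
--     simple string parsing algo is enough
--     """
--     name_traj = []
--     for x in traj:
--         i = 0
--         y = ""
--         while i < len(x):
--             if x[i].isdigit():
--                 j = i+1
--                 while j < len(x):
--                     if not x[j].isdigit():
--                         break
--                     j += 1
--                 y += all_nodes[int(x[i:j])]
--                 i = j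
--             else:
--                 y += x[i]
--                 i += 1
--         name_traj.append(y)
--     return name_traj
-- ===== SOURCE B (Python) =====
-- def process_good_traj(traj, all_nodes):
--     out = []
--     for x in traj:
--         parts = []
--         run = ""
--         for c in x:
--             if c.isdigit():
--                 run += c
--             else:
--                 if run:
--                     parts.append(all_nodes[int(run)])
--                     run = ""
--                 parts.append(c)
--         if run:
--             parts.append(all_nodes[int(run)])
--         out.append("".join(parts))
--     return out
-- ===== Notes on version B (the rewrite author's own statement) =====
-- stated objective: simpler
-- what changed: Replaces the nested while-loops with explicit i/j index bookkeeping and string slicing by a single pass over each string's characters that accumulates the current digit run and flushes it into a parts list, joined at the end.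
import Mathlib
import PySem

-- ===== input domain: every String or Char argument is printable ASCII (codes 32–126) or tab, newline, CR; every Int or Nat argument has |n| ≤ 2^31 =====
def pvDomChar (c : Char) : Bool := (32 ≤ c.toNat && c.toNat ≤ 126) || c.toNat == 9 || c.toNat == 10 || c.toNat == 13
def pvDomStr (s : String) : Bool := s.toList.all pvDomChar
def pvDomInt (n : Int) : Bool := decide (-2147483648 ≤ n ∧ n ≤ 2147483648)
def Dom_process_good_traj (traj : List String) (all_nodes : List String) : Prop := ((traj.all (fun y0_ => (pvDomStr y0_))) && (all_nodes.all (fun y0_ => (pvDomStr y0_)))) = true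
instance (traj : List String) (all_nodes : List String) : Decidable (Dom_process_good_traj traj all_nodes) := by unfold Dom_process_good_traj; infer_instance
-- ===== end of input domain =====

-- B replaces A's nested while-loops and index bookkeeping by a single pass with a
-- digit-run accumulator and a parts list (objective: simpler). Return values only; no mutation.

-- all_nodes[int(run)] — shared by both Pythons verbatim (the raising case is excluded by Pre_)
def pvLookup (all_nodes : List String) (run : List Char) : List Char :=
  ((PySem.List.pyGet? all_nodes ((PySem.Int.ofChars? run).getD 0)).getD "").toList

-- ===== PORT A =====
-- A's outer while over i: on a digit, the inner while over j computes the maximal digit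
-- run x[i:j] (= takeWhile) and the loop resumes at j (= dropWhile).
def pvScanA (all_nodes : List String) : List Char → List Char
  | [] => []
  | c :: rest =>
    if hc : PySem.Chars.isdigit c then
      pvLookup all_nodes (List.takeWhile PySem.Chars.isdigit (c :: rest)) ++
        pvScanA all_nodes (List.dropWhile PySem.Chars.isdigit (c :: rest))
    else
      c :: pvScanA all_nodes rest
  termination_by l => l.length
  decreasing_by
  · simp only [List.dropWhile, hc]
    exact Nat.lt_succ_of_le (List.length_dropWhile_le _ _)
  · simp

def process_good_traj (traj : List String) (all_nodes : List String) : List String :=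
  traj.map (fun x => String.ofList (pvScanA all_nodes x.toList))

-- ===== PORT B =====
-- one fold per string, state = (finished parts, current digit run)
def pvStepB (all_nodes : List String) (st : List (List Char) × List Char) (c : Char) :
    List (List Char) × List Char :=
  if PySem.Chars.isdigit c then (st.1, st.2 ++ [c])
  else
    ((if st.2.isEmpty then st.1 else st.1 ++ [pvLookup all_nodes st.2]) ++ [[c]], [])

def pvFlushB (all_nodes : List String) (st : List (List Char) × List Char) : List (List Char) :=
  if st.2.isEmpty then st.1 else st.1 ++ [pvLookup all_nodes st.2]

def process_good_traj_alt (traj : List String) (all_nodes : List String) : List String :=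
  traj.map (fun x =>
    String.ofList ((pvFlushB all_nodes (x.toList.foldl (pvStepB all_nodes) ([], []))).flatten))

-- ===== PRECONDITION & SPEC =====
-- Pre_ excludes exactly the inputs on which A raises IndexError (some maximal digit run
-- names an index ≥ len(all_nodes)); B raises the same IndexError there.
def Pre_process_good_traj (traj : List String) (all_nodes : List String) : Prop :=
  ∀ x ∈ traj,
    ∀ g ∈ x.toList.splitBy (fun a b => PySem.Chars.isdigit a == PySem.Chars.isdigit b),
      (g.head?.any PySem.Chars.isdigit) = true →
        ((PySem.Int.ofChars? g).getD 0) < (all_nodes.length : Int)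
instance (traj : List String) (all_nodes : List String) : Decidable (Pre_process_good_traj traj all_nodes) := by unfold Pre_process_good_traj; infer_instance

def pvWitness_process_good_traj : List String × List String :=
  (["1[->0]", "ab"], ["S2", "L3"])

def Spec_process_good_traj (traj : List String) (all_nodes : List String) (out : List String) : Prop := out = process_good_traj_alt traj all_nodes
instance (traj : List String) (all_nodes : List String) (out : List String) : Decidable (Spec_process_good_traj traj all_nodes out) := by unfold Spec_process_good_traj; infer_instance

-- ===== CLAIM (what is proved, stated in full; the proofs are below) =====
def Claim_equal_process_good_traj : Prop := ∀ (traj : List String) (all_nodes : List String), Dom_process_good_traj traj all_nodes → Pre_process_good_traj traj all_nodes → Spec_process_good_traj traj all_nodes (process_good_traj traj all_nodes)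

-- ===== LEMMAS AND PROOFS =====

theorem pv_takeWhile_append {p : Char → Bool} (xs ys : List Char)
    (h : xs.all p = true) : List.takeWhile p (xs ++ ys) = xs ++ List.takeWhile p ys := by
  induction xs with
  | nil => simp
  | cons a t ih =>
    simp only [List.all_cons, Bool.and_eq_true] at h
    simp [h.1, ih h.2]

theorem pv_dropWhile_append {p : Char → Bool} (xs ys : List Char)
    (h : xs.all p = true) : List.dropWhile p (xs ++ ys) = List.dropWhile p ys := by
  induction xs with
  | nil => simp
  | cons a t ih =>
    simp only [List.all_cons, Bool.and_eq_true] at h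
    simp [h.1, ih h.2]

theorem pvScanA_run (all_nodes : List String) (run rest : List Char)
    (hne : run ≠ []) (hall : run.all PySem.Chars.isdigit = true)
    (hrest : List.takeWhile PySem.Chars.isdigit rest = []) :
    pvScanA all_nodes (run ++ rest) = pvLookup all_nodes run ++ pvScanA all_nodes rest := by
  obtain ⟨c, t, rfl⟩ := List.exists_cons_of_ne_nil hne
  have hc : PySem.Chars.isdigit c = true := by
    simp only [List.all_cons, Bool.and_eq_true] at hall; exact hall.1
  have hdw : List.dropWhile PySem.Chars.isdigit rest = rest := by
    have := List.takeWhile_append_dropWhile (p := PySem.Chars.isdigit) (l := rest)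
    rw [hrest] at this; simpa using this
  rw [List.cons_append, pvScanA, dif_pos hc, ← List.cons_append,
      pv_takeWhile_append _ _ hall, pv_dropWhile_append _ _ hall, hrest, hdw, List.append_nil]

theorem pv_main (all_nodes : List String) (l : List Char) :
    ∀ (parts : List (List Char)) (run : List Char),
      run.all PySem.Chars.isdigit = true →
      (pvFlushB all_nodes (l.foldl (pvStepB all_nodes) (parts, run))).flatten
        = parts.flatten ++ pvScanA all_nodes (run ++ l) := by
  induction l with
  | nil =>
    intro parts run hall
    by_cases hrun : run = []
    · subst hrun; simp [pvFlushB, pvScanA]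
    · have hre : run.isEmpty = false := by simpa [List.isEmpty_iff] using hrun
      have hsc := pvScanA_run all_nodes run [] hrun hall (by simp)
      simp only [List.append_nil] at hsc
      simp [pvFlushB, hre, hsc, pvScanA]
  | cons c t ih =>
    intro parts run hall
    rw [List.foldl_cons, pvStepB]
    by_cases hc : PySem.Chars.isdigit c = true
    · rw [if_pos hc]
      have := ih parts (run ++ [c]) (by simp [List.all_append, hall, hc])
      simpa [List.append_assoc] using this
    · rw [if_neg hc]
      by_cases hrun : run = []
      · subst hrun
        have h1 := ih (parts ++ [[c]]) [] (by simp)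
        simpa [pvScanA, hc] using h1
      · have hre : run.isEmpty = false := by simpa [List.isEmpty_iff] using hrun
        have h1 := ih ((parts ++ [pvLookup all_nodes run]) ++ [[c]]) [] (by simp)
        have hsc := pvScanA_run all_nodes run (c :: t) hrun hall (by simp [List.takeWhile, hc])
        simp only [hre, Bool.false_eq_true, if_false]
        rw [h1, List.nil_append, hsc]
        simp [pvScanA, hc]

-- ===== VERDICT (by name: the statement is the Claim_ definition above) =====
theorem process_good_traj_spec : Claim_equal_process_good_traj := by
  intro traj all_nodes _ _
  unfold Spec_process_good_traj process_good_traj process_good_traj_alt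
  refine List.map_congr_left (fun x _ => ?_)
  rw [pv_main all_nodes x.toList [] [] (by simp)]
  simp
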